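-- pv_equiv track=rewrite | github.com/soander/NEU-CS5001-2021Fall | Module5/rocket.py | tip_of_rocket
-- ===== SOURCE A (Python) =====
-- def tip_of_rocket(size):
--     """
--     Function: A function to draw tip_of_rocket
--     :param size: The input size of rocket
--     :return: A string representing the tip_of_rocket
--     """
--     # Create the empty tip_of_rocket
--     the_tip_of_rocket = ""
--     # Use while loop and if decision to draw the_tip_of_rocket
--     height = 0
--     while height < size * 2 - 1:
--         width = 0
--         while width < size * 4 + 2:
--             if size * 2 - (height + 1) <= width < size * 2:
--                 the_tip_of_rocket += "/"
--             elif width == size * 2 or width == size * 2 + 1: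
--                 the_tip_of_rocket += "*"
--             elif size * 2 + 1 < width <= size * 2 + (height + 2):
--                 the_tip_of_rocket += "\\"
--             else:
--                 the_tip_of_rocket += " "
--             width += 1
--         the_tip_of_rocket += "\n"
--         height += 1
--     # Return the_tip_of_rocket
--     return str(the_tip_of_rocket)
-- ===== SOURCE B (Python) =====
-- def tip_of_rocket(size):
--     """
--     Function: A function to draw tip_of_rocket
--     :param size: The input size of rocket
--     :return: A string representing the tip_of_rocket
--     """
--     n = size * 2 - 1
--     return "".join(
--         " " * (n - h) + "/" * (h + 1) + "**" + "\\" * (h + 1) + " " * (n - h) + "\n"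
--         for h in range(n)
--     )
-- ===== Notes on version B (the rewrite author's own statement) =====
-- stated objective: simpler
-- what changed: Replaces the per-cell nested while loops with four positional branch tests by a single pass over rows that builds each line directly from segment lengths via string repetition and join.
import Mathlib
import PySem

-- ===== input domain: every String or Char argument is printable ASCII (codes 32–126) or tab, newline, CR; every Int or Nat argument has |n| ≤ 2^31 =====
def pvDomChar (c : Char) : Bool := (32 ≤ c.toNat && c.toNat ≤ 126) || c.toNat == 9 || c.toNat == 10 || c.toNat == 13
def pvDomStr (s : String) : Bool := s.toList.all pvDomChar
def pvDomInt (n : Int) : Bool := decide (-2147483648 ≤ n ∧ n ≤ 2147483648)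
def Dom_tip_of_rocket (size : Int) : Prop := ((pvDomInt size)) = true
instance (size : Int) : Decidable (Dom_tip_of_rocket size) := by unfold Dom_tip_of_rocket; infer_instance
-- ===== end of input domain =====

-- B builds each row from segment lengths (string repetition + join) instead of A's
-- per-cell inner loop with four positional branch tests; objective: simpler.

-- ===== PORT A =====
-- the four-branch cell test of A's inner loop, branches in A's order
def tipCellA (size h w : Int) : Char :=
  if size * 2 - (h + 1) ≤ w ∧ w < size * 2 then '/'
  else if w = size * 2 ∨ w = size * 2 + 1 then '*'
  else if size * 2 + 1 < w ∧ w ≤ size * 2 + (h + 2) then '\\'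
  else ' '

-- outer while over height, inner while over width, one shared string accumulator
def tip_of_rocket (size : Int) : String :=
  String.ofList ((List.range (size * 2 - 1).toNat).foldl
    (fun acc (hi : Nat) =>
      ((List.range (size * 4 + 2).toNat).foldl
        (fun acc2 (wi : Nat) => acc2 ++ [tipCellA size (hi : Int) (wi : Int)]) acc) ++ ['\n'])
    [])

-- ===== PORT B =====
-- one line per row, built from segment lengths, joined
def tip_of_rocket_alt (size : Int) : String :=
  let n : Int := size * 2 - 1
  String.ofList (((List.range n.toNat).map (fun (h : Nat) =>
    List.replicate (n - (h : Int)).toNat ' ' ++ List.replicate (h + 1) '/'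
      ++ ['*', '*'] ++ List.replicate (h + 1) '\\'
      ++ List.replicate (n - (h : Int)).toNat ' ' ++ ['\n'])).flatten)

-- ===== PRECONDITION & SPEC =====
def Spec_tip_of_rocket (size : Int) (out : String) : Prop := out = tip_of_rocket_alt size
instance (size : Int) (out : String) : Decidable (Spec_tip_of_rocket size out) := by unfold Spec_tip_of_rocket; infer_instance

-- ===== CLAIM (what is proved, stated in full; the proofs are below) =====
def Claim_equal_tip_of_rocket : Prop := ∀ (size : Int), Dom_tip_of_rocket size → Spec_tip_of_rocket size (tip_of_rocket size)

-- ===== LEMMAS AND PROOFS =====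

-- the inner while loop appends exactly the mapped characters
theorem inner_app (size h : Int) (l : List Nat) (acc : List Char) :
    l.foldl (fun a (x : Nat) => a ++ [tipCellA size h (x : Int)]) acc
      = acc ++ l.map (fun (x : Nat) => tipCellA size h (x : Int)) := by
  induction l generalizing acc with
  | nil => simp
  | cons x t ih => rw [List.foldl_cons, ih]; simp

-- the outer while loop is a flatMap of row ++ newline
theorem outer_flat (size : Int) (l : List Nat) (acc : List Char) :
    l.foldl (fun acc (hi : Nat) =>
        ((List.range (size * 4 + 2).toNat).foldl
          (fun acc2 (wi : Nat) => acc2 ++ [tipCellA size (hi : Int) (wi : Int)]) acc) ++ ['\n']) acc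
      = acc ++ l.flatMap (fun (hi : Nat) =>
          (List.range (size * 4 + 2).toNat).map (fun (wi : Nat) => tipCellA size (hi : Int) (wi : Int)) ++ ['\n']) := by
  induction l generalizing acc with
  | nil => simp
  | cons x t ih => rw [List.foldl_cons, inner_app, ih]; simp

theorem flatMap_congr' {α β : Type} (l : List α) (f g : α → List β)
    (H : ∀ x ∈ l, f x = g x) : l.flatMap f = l.flatMap g := by
  induction l with
  | nil => rfl
  | cons x t ih => simp_all

-- one row of A equals B's segment decomposition
theorem row_eq (size : Int) (hi : Nat) (hhi : (hi : Int) < size * 2 - 1) :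
    (List.range (size * 4 + 2).toNat).map (fun (wi : Nat) => tipCellA size (hi : Int) (wi : Int))
      = List.replicate (size * 2 - 1 - (hi : Int)).toNat ' ' ++ List.replicate (hi + 1) '/'
        ++ List.replicate 2 '*' ++ List.replicate (hi + 1) '\\'
        ++ List.replicate (size * 2 - 1 - (hi : Int)).toNat ' ' := by
  apply List.ext_getElem
  · simp; omega
  · intro w hw1 hw2
    simp only [List.getElem_map, List.getElem_range]
    simp only [List.getElem_append, List.length_replicate, List.length_append,
      List.getElem_replicate]
    have hw : (w : Int) < size * 4 + 2 := by
      simp at hw1; omega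
    simp only [tipCellA]
    split_ifs <;> first | rfl | (exfalso; omega)

theorem tip_lists_eq (size : Int) :
    tip_of_rocket size = tip_of_rocket_alt size := by
  unfold tip_of_rocket tip_of_rocket_alt
  dsimp only
  rw [outer_flat, ← List.flatMap_def]
  simp only [List.nil_append]
  congr 1
  apply flatMap_congr'
  intro hi hmem
  have hlt : (hi : Int) < size * 2 - 1 := by
    simp [List.mem_range] at hmem; omega
  rw [row_eq size hi hlt]
  simp

-- ===== VERDICT (by name: the statement is the Claim_ definition above) =====
theorem tip_of_rocket_spec : Claim_equal_tip_of_rocket := by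
  intro size _
  exact tip_lists_eq size
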